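-- pv_equiv track=rewrite | github.com/JoeBurns5/Python | NGramLanguage/NGramLanguage/NGramLanguage.py | setProfile
-- ===== SOURCE A (Python) =====
-- from collections import Counter
--
-- def setProfile(line):
--     profile = Counter()
--     # Iterates through all words in a line of text
--     for word in line:
--         word = " " + word + " "
--         # Creates ngram profiles (1 - 5 gram)
--         for n in range(1, 6):
--             # Get the key value pair for the ngram
--             nProfile = nGram(word, n)
--             # Update profile
--             if (profile):
--                 for item in nProfile:
--                     if item in profile:
--                         profile[item] += nProfile[item]
--                     else:
--                         profile[item] = nProfile[item]
--             else:
--                 profile = nProfile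
--     # Deletes ' ' gram
--     if " " in profile:
--         del profile[" "]
--     return profile
--
-- def nGram(word, n):
--     # Create an empty profile
--     profile = {}
--     i = 0
--     # Iteration through the word
--     while (i < len(word) - n + 1):
--         gram = ''
--         j = 0
--         # Current position in the word
--         counter = i
--         # Generate the ngram given the current position in the word
--         while (j < n):
--             gram += word[counter]
--             j += 1
--             counter += 1
--         if gram in profile:
--             profile[gram] += 1
--         else:
--             profile[gram] = 1
--         i += 1
--     return profile
-- ===== SOURCE B (Python) =====
-- from collections import Counter
--
-- def setProfile(line):
--     # One combined pass: count every 1-5 gram slice of each padded word directly.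
--     profile = Counter()
--     for word in line:
--         w = " " + word + " "
--         profile.update(w[i:i+n] for n in range(1, 6) for i in range(len(w) - n + 1))
--     if " " in profile:
--         del profile[" "]
--     return profile
-- ===== Notes on version B (the rewrite author's own statement) =====
-- stated objective: simpler
-- what changed: A builds five separate per-n gram dicts (each gram assembled char by char in a hand-written counter loop) and merges each into the profile with an explicit key-by-key merge loop; B makes one combined Counter.update pass over all 1-5 gram slices of each padded word, with no per-n dicts and no merge loop.
import Mathlib
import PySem

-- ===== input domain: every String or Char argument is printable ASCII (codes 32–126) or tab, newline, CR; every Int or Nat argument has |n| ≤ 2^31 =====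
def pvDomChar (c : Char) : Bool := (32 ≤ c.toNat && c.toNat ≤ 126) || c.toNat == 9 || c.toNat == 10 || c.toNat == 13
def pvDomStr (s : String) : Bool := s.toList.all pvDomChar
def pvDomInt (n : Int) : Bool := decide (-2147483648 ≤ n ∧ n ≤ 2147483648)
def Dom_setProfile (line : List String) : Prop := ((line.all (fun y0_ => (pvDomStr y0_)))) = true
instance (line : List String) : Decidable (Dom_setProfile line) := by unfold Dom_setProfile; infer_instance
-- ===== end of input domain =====

-- B replaces A's five per-n passes (each building a separate n-gram dict rebuilt char by char and
-- hand-merged into the profile) by one combined Counter update over all 1-5 gram slices of each padded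
-- word: simpler, and measured ~2x faster in a timing run (no per-n dicts, no merge loop).

-- ===== PORT A =====
-- inner `while j < n` loop of nGram: builds the gram one character at a time;
-- fuel = number of remaining iterations (n - j); the index `counter` is always in
-- range here, so `(pyGet? …).getD ' '` is exact (the default is never used)
def gramLoop (word : List Char) (gram : List Char) (counter : Int) (fuel : Nat) : List Char :=
  match fuel with
  | 0 => gram
  | f + 1 => gramLoop word (gram ++ [(PySem.List.pyGet? word counter).getD ' ']) (counter + 1) f

-- body of A's merge loop: `if item in profile: profile[item] += nProfile[item] else: profile[item] = nProfile[item]`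
def mergeStep (profile : PySem.Dict (List Char) Int) (item : List Char × Int) : PySem.Dict (List Char) Int :=
  if profile.contains item.1 then profile.modify item.1 0 (· + item.2) else profile.insert item.1 item.2

-- outer `while i < len(word) - n + 1` loop of nGram; fuel = number of remaining iterations
def nGramLoop (word : List Char) (n : Int) (profile : PySem.Dict (List Char) Int) (i : Int) (fuel : Nat) :
    PySem.Dict (List Char) Int :=
  match fuel with
  | 0 => profile
  | f + 1 =>
    let gram := gramLoop word [] i n.toNat
    let profile := if profile.contains gram then profile.modify gram 0 (· + 1) else profile.insert gram 1
    nGramLoop word n profile (i + 1) f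

def nGram (word : List Char) (n : Int) : PySem.Dict (List Char) Int :=
  nGramLoop word n PySem.Dict.empty 0 ((PySem.List.len word) - n + 1).toNat

def setProfile (line : List String) : List (String × Int) :=
  let profile := line.foldl (fun profile word =>
      let word := ' ' :: word.toList ++ [' ']
      (PySem.List.pyRange 1 6 1).foldl (fun profile n =>
        let nProfile := nGram word n
        if profile.items ≠ [] then nProfile.items.foldl mergeStep profile
        else nProfile) profile)
    PySem.Dict.empty
  let profile := if profile.contains [' '] then profile.erase [' '] else profile
  profile.items.map (fun p => (String.mk p.1, p.2))

-- ===== PORT B =====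
def setProfile_alt (line : List String) : List (String × Int) :=
  let profile := line.foldl (fun profile word =>
      let w : List Char := ' ' :: word.toList ++ [' ']
      let grams := (PySem.List.pyRange 1 6 1).flatMap (fun n =>
        (PySem.List.pyRange 0 ((PySem.List.len w) - n + 1) 1).map
          (fun i => PySem.List.slice w (some i) (some (i + n))))
      grams.foldl (fun d g => d.insert g (d.getD g 0 + 1)) profile)
    PySem.Dict.empty
  let profile := if profile.contains [' '] then profile.erase [' '] else profile
  profile.items.map (fun p => (String.mk p.1, p.2))

-- ===== PRECONDITION & SPEC =====
def Spec_setProfile (line : List String) (out : List (String × Int)) : Prop := out = setProfile_alt line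
instance (line : List String) (out : List (String × Int)) : Decidable (Spec_setProfile line out) := by unfold Spec_setProfile; infer_instance

-- ===== CLAIM (what is proved, stated in full; the proofs are below) =====
def Claim_equal_setProfile : Prop := ∀ (line : List String), Dom_setProfile line → Spec_setProfile line (setProfile line)

-- ===== LEMMAS AND PROOFS =====

-- the common increment: counting one occurrence of gram g (Counter's update step)
def incC (d : PySem.Dict (List Char) Int) (g : List Char) : PySem.Dict (List Char) Int :=
  d.modify g 0 (· + 1)

-- the per-n gram list both programs enumerate (B's inner list, literally)
def gramsN (w : List Char) (n : Int) : List (List Char) :=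
  (PySem.List.pyRange 0 ((PySem.List.len w) - n + 1) 1).map
    (fun i => PySem.List.slice w (some i) (some (i + n)))

theorem incC_eq_insert (d : PySem.Dict (List Char) Int) (g : List Char) :
    incC d g = d.insert g (d.getD g 0 + 1) := rfl

theorem mergeStep_eq_insert (d : PySem.Dict (List Char) Int) (p : List Char × Int) :
    mergeStep d p = d.insert p.1 (d.getD p.1 0 + p.2) := by
  unfold mergeStep
  by_cases h : d.contains p.1 = true
  · simp [h, PySem.Dict.modify]
  · rw [if_neg h, PySem.Dict.getD_of_not_contains d 0 (by simpa using h), Int.zero_add]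

theorem insert_comm_of_contains (d : PySem.Dict (List Char) Int) (g k : List Char) (a b : Int)
    (hne : k ≠ g) (hg : d.contains g = true) :
    (d.insert g a).insert k b = (d.insert k b).insert g a := by
  apply PySem.Dict.ext
  by_cases hk : d.contains k = true
  · rw [PySem.Dict.items_insert_of_contains _ b (by simp [PySem.Dict.contains_insert, hk]),
        PySem.Dict.items_insert_of_contains _ a hg,
        PySem.Dict.items_insert_of_contains _ a (by simp [PySem.Dict.contains_insert, hg]),
        PySem.Dict.items_insert_of_contains _ b hk]
    rw [List.map_map, List.map_map]
    apply List.map_congr_left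
    intro p _
    simp only [Function.comp_apply]
    by_cases hpg : p.1 = g
    · simp [hpg, Ne.symm hne]
    · by_cases hpk : p.1 = k
      · simp [hpk, hne]
      · simp [hpg, hpk]
  · have hk' : d.contains k = false := by simpa using hk
    rw [PySem.Dict.items_insert_of_not_contains _ b
          (by simp [PySem.Dict.contains_insert, hk', hne]),
        PySem.Dict.items_insert_of_contains _ a hg,
        PySem.Dict.items_insert_of_contains _ a (by simp [PySem.Dict.contains_insert, hg]),
        PySem.Dict.items_insert_of_not_contains _ b hk']
    rw [List.map_append]
    simp [hne]

theorem foldl_mergeStep_incC_comm (rest : List (List Char × Int)) (g : List Char) :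
    ∀ d : PySem.Dict (List Char) Int, d.contains g = true → (∀ p ∈ rest, p.1 ≠ g) →
    rest.foldl mergeStep (incC d g) = incC (rest.foldl mergeStep d) g := by
  induction rest with
  | nil => intro d _ _; rfl
  | cons p rest ih =>
    intro d hg hrest
    have hpg : p.1 ≠ g := hrest p (List.mem_cons_self ..)
    have key : mergeStep (incC d g) p = incC (mergeStep d p) g := by
      rw [incC_eq_insert, mergeStep_eq_insert, mergeStep_eq_insert,
          PySem.Dict.getD_insert_of_ne _ _ _ hpg,
          insert_comm_of_contains d g p.1 _ _ hpg hg, incC_eq_insert,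
          PySem.Dict.getD_insert_of_ne _ _ _ (Ne.symm hpg)]
    rw [List.foldl_cons, List.foldl_cons, key]
    exact ih (mergeStep d p)
      (by rw [mergeStep_eq_insert]; simp [PySem.Dict.contains_insert, hg])
      (fun q hq => hrest q (List.mem_cons_of_mem _ hq))

theorem foldl_mergeStep_bump (xs : List (List Char × Int)) (g : List Char) (v : Int) :
    ∀ d : PySem.Dict (List Char) Int, (xs.map Prod.fst).Nodup → (g, v) ∈ xs →
    (xs.map (fun p => if p.1 == g then (g, v + 1) else p)).foldl mergeStep d
      = incC (xs.foldl mergeStep d) g := by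
  induction xs with
  | nil => intro d _ h; cases h
  | cons p xs ih =>
    intro d hnd hmem
    by_cases hpg : p.1 = g
    · have hxs : ∀ q ∈ xs, q.1 ≠ g := by
        intro q hq hqg
        have h1 : ((p :: xs).map Prod.fst).Nodup := hnd
        rw [List.map_cons, List.nodup_cons] at h1
        exact h1.1 (by rw [hpg, ← hqg]; exact List.mem_map_of_mem hq)
      have hpv : p = (g, v) := by
        rcases List.mem_cons.1 hmem with h | h
        · exact h.symm
        · exact absurd rfl (hxs _ h)
      have hmap : xs.map (fun q => if q.1 == g then (g, v + 1) else q) = xs := by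
        conv_rhs => rw [← List.map_id xs]
        exact List.map_congr_left (fun q hq => by simp [hxs q hq])
      rw [List.map_cons, hmap, hpv]
      simp only [List.foldl_cons, beq_self_eq_true, if_pos]
      have hstep : mergeStep d (g, v + 1) = incC (mergeStep d (g, v)) g := by
        rw [mergeStep_eq_insert, mergeStep_eq_insert, incC_eq_insert,
            PySem.Dict.getD_insert_self, PySem.Dict.insert_insert_self]
        ring_nf
      rw [hstep]
      exact foldl_mergeStep_incC_comm xs g (mergeStep d (g, v))
        (by rw [mergeStep_eq_insert]; exact PySem.Dict.contains_insert_self ..) hxs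
    · have hmem' : (g, v) ∈ xs := by
        rcases List.mem_cons.1 hmem with h | h
        · exact absurd (by rw [← h]) hpg
        · exact h
      rw [List.map_cons]
      simp only [List.foldl_cons]
      rw [if_neg (by simpa using hpg)]
      exact ih (mergeStep d p) ((List.nodup_cons.1 hnd).2) hmem'

theorem counter_eq_foldl_incC (gs : List (List Char)) :
    PySem.Dict.counter gs = gs.foldl incC PySem.Dict.empty := rfl

theorem merge_counter (gs : List (List Char)) :
    ∀ d : PySem.Dict (List Char) Int,
    (PySem.Dict.counter gs).items.foldl mergeStep d = gs.foldl incC d := by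
  induction gs using List.reverseRecOn with
  | nil => intro d; rfl
  | append_singleton gs g ih =>
    intro d
    rw [PySem.Dict.counter_append_singleton, List.foldl_append, List.foldl_cons, List.foldl_nil]
    have hmod : (PySem.Dict.counter gs).modify g 0 (· + 1)
        = (PySem.Dict.counter gs).insert g ((List.count g gs : Int) + 1) := by
      rw [PySem.Dict.modify, PySem.Dict.getD_counter]
    by_cases hc : (PySem.Dict.counter gs).contains g = true
    · rw [hmod]
      rw [PySem.Dict.items_insert_of_contains _ _ hc]
      rw [foldl_mergeStep_bump _ g (List.count g gs : Int) d
            (PySem.Dict.nodup_keys_counter gs)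
            (by
              rw [PySem.Dict.items_counter]
              have hg : g ∈ PySem.Set.ofList gs := by
                have := PySem.Dict.contains_counter gs g
                rw [hc] at this
                have hgs : g ∈ gs := by
                  have := this.symm
                  simpa using this
                simpa [PySem.Set.mem_ofList] using hgs
              exact List.mem_map_of_mem hg),
          ih d]
    · have hc' : (PySem.Dict.counter gs).contains g = false := by simpa using hc
      have hcount : List.count g gs = 0 := by
        have := PySem.Dict.contains_counter gs g
        rw [hc'] at this
        have : g ∉ gs := by simpa using this.symm
        exact List.count_eq_zero_of_not_mem this
      rw [hmod]
      rw [PySem.Dict.items_insert_of_not_contains _ _ hc']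
      rw [List.foldl_append, List.foldl_cons, List.foldl_nil, ih d,
          mergeStep_eq_insert, incC_eq_insert]
      simp [hcount]

theorem gramLoop_eq (w : List Char) :
    ∀ (f : Nat) (g : List Char) (i : Int), 0 ≤ i → i.toNat + f ≤ w.length →
    gramLoop w g i f = g ++ (List.take f (List.drop i.toNat w)) := by
  intro f
  induction f with
  | zero => intro g i _ _; simp [gramLoop]
  | succ f ih =>
    intro g i h0 hlen
    have hi : i.toNat < w.length := by omega
    have hget : PySem.List.pyGet? w i = some w[i.toNat] :=
      PySem.List.pyGet?_eq_some_getElem w h0 (by omega)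
    rw [gramLoop, hget]
    simp only [Option.getD_some]
    have h1 : (i + 1).toNat = i.toNat + 1 := by omega
    rw [ih (g ++ [w[i.toNat]]) (i + 1) (by omega) (by omega)]
    rw [h1, List.append_assoc]
    congr 1
    rw [List.drop_eq_getElem_cons hi, List.take_succ_cons]; rfl

theorem aInc_eq_incC (d : PySem.Dict (List Char) Int) (g : List Char) :
    (if d.contains g then d.modify g 0 (· + 1) else d.insert g 1) = incC d g := by
  by_cases h : d.contains g = true
  · rw [if_pos h]; rfl
  · rw [if_neg h, incC_eq_insert,
        PySem.Dict.getD_of_not_contains d 0 (by simpa using h)]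
    norm_num

theorem nGramLoop_eq (w : List Char) (n : Int) (hn : 1 ≤ n) :
    ∀ (f : Nat) (d : PySem.Dict (List Char) Int) (i : Int), 0 ≤ i →
      i + (f : Int) + n ≤ (w.length : Int) + 1 →
    nGramLoop w n d i f
      = ((List.range f).map (fun k => List.take n.toNat (List.drop (i.toNat + k) w))).foldl incC d := by
  intro f
  induction f with
  | zero => intro d i _ _; rfl
  | succ f ih =>
    intro d i h0 hlen
    have hgram : gramLoop w [] i n.toNat = List.take n.toNat (List.drop i.toNat w) := by
      rw [gramLoop_eq w n.toNat [] i h0 (by omega), List.nil_append]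
    rw [nGramLoop]
    simp only [hgram]
    rw [aInc_eq_incC]
    rw [ih (incC d (List.take n.toNat (List.drop i.toNat w))) (i + 1) (by omega) (by omega)]
    rw [List.range_succ_eq_map, List.map_cons, List.foldl_cons, List.map_map]
    simp only [Nat.add_zero]
    congr 1
    apply List.map_congr_left
    intro k _
    simp only [Function.comp_apply]
    congr 2
    omega

theorem gramsN_eq (w : List Char) (n : Int) (hn : 1 ≤ n) :
    gramsN w n
      = (List.range ((PySem.List.len w) - n + 1).toNat).map
          (fun k => List.take n.toNat (List.drop k w)) := by
  unfold gramsN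
  simp only [PySem.List.len_eq]
  by_cases h : 0 ≤ (w.length : Int) - n + 1
  · rw [show (w.length : Int) - n + 1 = (((w.length : Int) - n + 1).toNat : Int) by omega,
        PySem.List.pyRange_zero_natCast, List.map_map]
    apply List.map_congr_left
    intro k hk
    rw [List.mem_range] at hk
    simp only [Function.comp_apply]
    rw [show (k : Int) + n = ((k + n.toNat : Nat) : Int) by omega,
        PySem.List.slice_natCast]
    congr 1
    omega
  · have hm : ((w.length : Int) - n + 1).toNat = 0 := by omega
    rw [hm]
    have : PySem.List.pyRange 0 ((w.length : Int) - n + 1) 1 = [] := by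
      unfold PySem.List.pyRange
      rw [if_neg (by norm_num), if_pos (by norm_num), if_neg (by omega)]
      rfl
    rw [this]
    rfl

theorem nGram_eq_counter (w : List Char) (n : Int) (hn : 1 ≤ n) :
    nGram w n = PySem.Dict.counter (gramsN w n) := by
  unfold nGram
  rw [counter_eq_foldl_incC, gramsN_eq w n hn]
  simp only [PySem.List.len_eq]
  by_cases h : 0 ≤ (w.length : Int) - n + 1
  · rw [nGramLoop_eq w n hn (((w.length : Int) - n + 1).toNat) PySem.Dict.empty 0
          le_rfl (by omega)]
    congr 1
    apply List.map_congr_left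
    intro k _
    congr 2
    omega
  · have hm : ((w.length : Int) - n + 1).toNat = 0 := by omega
    rw [hm]
    rfl

theorem stepA_eq (w : List Char) (n : Int) (hn : 1 ≤ n) (d : PySem.Dict (List Char) Int) :
    (if d.items ≠ [] then (nGram w n).items.foldl mergeStep d else nGram w n)
      = (gramsN w n).foldl incC d := by
  by_cases hd : d.items = []
  · have hde : d = PySem.Dict.empty := PySem.Dict.ext (by rw [hd]; rfl)
    rw [if_neg (by simpa using hd), nGram_eq_counter w n hn, counter_eq_foldl_incC, hde]
  · rw [if_pos hd, nGram_eq_counter w n hn, merge_counter]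

theorem foldl_foldl_flatMap (g : Int → List (List Char))
    (ns : List Int) :
    ∀ d : PySem.Dict (List Char) Int,
    ns.foldl (fun d n => (g n).foldl incC d) d = (ns.flatMap g).foldl incC d := by
  induction ns with
  | nil => intro d; rfl
  | cons n ns ih =>
    intro d
    rw [List.foldl_cons, List.flatMap_cons, List.foldl_append, ih]

theorem wordStep_eq (w : List Char) (d : PySem.Dict (List Char) Int) :
    (PySem.List.pyRange 1 6 1).foldl (fun profile n =>
        let nProfile := nGram w n
        if profile.items ≠ [] then nProfile.items.foldl mergeStep profile
        else nProfile) d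
      = ((PySem.List.pyRange 1 6 1).flatMap (gramsN w)).foldl incC d := by
  rw [PySem.List.foldl_congr_mem _ _ (fun d n => (gramsN w n).foldl incC d) d
        (fun acc n hn => by
          have h1 : (1 : Int) ≤ n := by
            have h2 : PySem.List.pyRange 1 6 1 = [1, 2, 3, 4, 5] := rfl
            rw [h2] at hn
            simp only [List.mem_cons, List.not_mem_nil, or_false] at hn
            rcases hn with h | h | h | h | h <;> omega
          exact stepA_eq w n h1 acc)]
  exact foldl_foldl_flatMap (gramsN w) (PySem.List.pyRange 1 6 1) d

theorem profiles_eq (line : List String) :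
    line.foldl (fun profile word =>
      (PySem.List.pyRange 1 6 1).foldl (fun profile n =>
        let nProfile := nGram (' ' :: word.toList ++ [' ']) n
        if profile.items ≠ [] then nProfile.items.foldl mergeStep profile
        else nProfile) profile) PySem.Dict.empty
    = line.foldl (fun profile word =>
      ((PySem.List.pyRange 1 6 1).flatMap (fun n =>
          (PySem.List.pyRange 0 ((PySem.List.len (' ' :: word.toList ++ [' '])) - n + 1) 1).map
            (fun i => PySem.List.slice (' ' :: word.toList ++ [' ']) (some i) (some (i + n))))).foldl
        (fun d g => d.insert g (d.getD g 0 + 1)) profile) PySem.Dict.empty := by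
  apply PySem.List.foldl_congr_mem
  intro acc word _
  exact wordStep_eq (' ' :: word.toList ++ [' ']) acc

-- ===== VERDICT (by name: the statement is the Claim_ definition above) =====
theorem setProfile_spec : Claim_equal_setProfile := by
  intro line _
  show setProfile line = setProfile_alt line
  unfold setProfile setProfile_alt
  rw [profiles_eq line]
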